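-- pv_equiv track=rewrite | github.com/pypi-data/pypi-mirror-367 | packages/pyrl-complete/pyrl_complete-0.1.3-py3-none-any.whl/pyrl_complete/common/string_utils.py | fill_placeholders_with_words
-- ===== SOURCE A (Python) =====
-- from typing import List
--
-- def is_word_char(c: chr) -> bool:
--     """Checks if a character is considered part of a 'word'.
--
--     A word character is defined as any alphanumeric character (a-z, A-Z, 0-9)
--     or an underscore (_).
--
--     Args:
--         c: The character to check.
--
--     Returns:
--         True if the character is a word character, False otherwise.
--     """
--     return c.isalnum() or c == "_"
--
-- def find_all_char_positions(text: str, char_to_find: chr) -> List[int]: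
--     """Finds all positions of a given character in a string.
--
--     Args:
--         text: The input string to search within.
--         char_to_find: The character to find.
--
--     Returns:
--         A list of integer indices for all occurrences of the character.
--         Returns an empty list if the character is not found.
--     """
--     return [i for i, char in enumerate(text) if char == char_to_find]
--
-- def fill_placeholders_with_words(prediction: str, input: str) -> str:
--     """Replaces placeholders ('?') in a prediction string with corresponding words from an input string.
--
--     This function iterates through placeholders in the `prediction` string. For each
--     placeholder, it finds the next available "word" in the `input` string, starting
--     its search from the placeholder's character index. The placeholder is then replaced
--     by the found word.
--
--     A "word" is a sequence of alphanumeric characters or underscores, as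
--     defined by `is_word_char`.
--
--     This positional matching is best suited for scenarios where the structure of
--     the input string is expected to align closely with the prediction string.
--
--     Example:
--         prediction = "set value ? for user ?"
--         input      = "set value 123 for user admin"
--         result     = "set value 123 for user admin"
--
--     Args:
--         prediction: The string containing placeholders ('?').
--         input: The string from which to extract words to fill the placeholders.
--
--     Returns:
--         The prediction string with placeholders filled. If no placeholders
--         are present, the original prediction string is returned.
--     """
--     placeholders = find_all_char_positions(prediction, "?")
--     if len(placeholders) == 0:
--         return prediction
--     while len(placeholders) > 0:
--         p = placeholders[0]
--         # Find the word in the input string starting from position p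
--         word_start = -1
--         for i in range(p, len(input)):
--             if is_word_char(input[i]):
--                 word_start = i
--                 break
--         if word_start == -1:
--             # No word found at or after p, cannot fill placeholder.
--             # Stop processing, as further positional matching is not possible.
--             break
--         word_end = word_start
--         while word_end < len(input) and is_word_char(input[word_end]):
--             word_end += 1
--         word = input[word_start:word_end]
--         prediction = prediction[:p] + word + prediction[p+1:]
--         placeholders = find_all_char_positions(prediction, "?")
--     return prediction
-- ===== SOURCE B (Python) =====
-- def fill_placeholders_with_words(prediction: str, input: str) -> str:
--     """Single pass: each '?' is filled with the word found in `input` starting at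
--     the placeholder's position in the output built so far (no re-scans, no splicing)."""
--     out = []
--     n = 0  # length of the output built so far = current position of the placeholder
--     for idx in range(len(prediction)):
--         c = prediction[idx]
--         if c != "?":
--             out.append(c)
--             n += 1
--             continue
--         j = n
--         while j < len(input) and not (input[j].isalnum() or input[j] == "_"):
--             j += 1
--         if j >= len(input):
--             # no word available: leave the rest of the prediction untouched
--             out.append(prediction[idx:])
--             break
--         k = j
--         while k < len(input) and (input[k].isalnum() or input[k] == "_"):
--             k += 1
--         word = input[j:k]
--         out.append(word)
--         n += len(word)
--     return "".join(out)
-- ===== Notes on version B (the rewrite author's own statement) =====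
-- stated objective: alternative
-- what changed: Instead of repeatedly splicing each word into the prediction and re-scanning the whole string for the next '?', B makes one pass over the prediction, tracking the length of the output built so far as the placeholder's effective position, and joins the pieces at the end.
import Mathlib
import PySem

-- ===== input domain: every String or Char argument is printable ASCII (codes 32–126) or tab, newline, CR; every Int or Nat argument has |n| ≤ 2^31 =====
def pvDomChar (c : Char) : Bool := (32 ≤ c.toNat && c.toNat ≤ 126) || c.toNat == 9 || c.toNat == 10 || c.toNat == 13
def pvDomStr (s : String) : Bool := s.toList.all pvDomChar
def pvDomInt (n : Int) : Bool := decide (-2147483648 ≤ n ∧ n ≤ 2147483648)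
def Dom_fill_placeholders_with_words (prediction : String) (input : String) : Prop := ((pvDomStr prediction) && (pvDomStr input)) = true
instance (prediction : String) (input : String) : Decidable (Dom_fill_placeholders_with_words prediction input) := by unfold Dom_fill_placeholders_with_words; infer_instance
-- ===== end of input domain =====

-- B replaces A's repeated splice-and-rescan loop by a single pass over the prediction
-- tracking the length of the output built so far; equivalence proved on all inputs.


-- ===== PORT A =====
-- is_word_char: c.isalnum() or c == "_"  (exact on the ASCII domain)
def pvIsWord (c : Char) : Bool := PySem.Chars.isalnum c || c == '_'

-- find_all_char_positions: [i for i, char in enumerate(text) if char == char_to_find]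
-- (indices produced by enumerate from 0 are nonnegative, so .toNat is exact)
def pvFindAll (text : List Char) (c : Char) : List Nat :=
  ((PySem.List.enumerate text 0).filter (fun ic => ic.2 == c)).map (fun ic => ic.1.toNat)

-- 'for i in range(p, len(input)): if is_word_char(input[i]): word_start = i; break'
def pvFindFrom (input : List Char) (i : Nat) : Option Nat :=
  if h : i < input.length then
    if pvIsWord input[i] then some i else pvFindFrom input (i + 1)
  else none
termination_by input.length - i

-- 'while word_end < len(input) and is_word_char(input[word_end]): word_end += 1'
def pvWordEnd (input : List Char) (j : Nat) : Nat :=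
  if h : j < input.length then
    if pvIsWord input[j] then pvWordEnd input (j + 1) else j
  else j
termination_by input.length - j

-- facts used by pvALoop's termination proof (cited in decreasing_by, hence above the port)
lemma pvWordEnd_ge (input : List Char) (j : Nat) : j ≤ pvWordEnd input j := by
  unfold pvWordEnd
  split
  · split
    · have := pvWordEnd_ge input (j + 1); omega
    · exact le_refl j
  · exact le_refl j
termination_by input.length - j

lemma pvWord_all (input : List Char) (j : Nat) :
    ∀ c ∈ (input.drop j).take (pvWordEnd input j - j), pvIsWord c = true := by
  intro c hc
  unfold pvWordEnd at hc
  split at hc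
  · rename_i h
    split at hc
    · rename_i hw
      have hge := pvWordEnd_ge input (j + 1)
      rw [List.drop_eq_getElem_cons h] at hc
      rw [show pvWordEnd input (j+1) - j = (pvWordEnd input (j+1) - (j+1)) + 1 by omega] at hc
      rw [List.take_succ_cons] at hc
      rcases List.mem_cons.mp hc with h1 | h2
      · exact h1 ▸ hw
      · exact pvWord_all input (j + 1) c h2
    · simp at hc
  · simp at hc
termination_by input.length - j

lemma pvFindAll_mem_aux (c : Char) :
    ∀ (l : List Char) (s q : Nat),
      q ∈ ((PySem.List.enumerate l (s : Int)).filter (fun ic => ic.2 == c)).map (fun ic => ic.1.toNat) →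
      s ≤ q ∧ l[q - s]? = some c := by
  intro l
  induction l with
  | nil => intro s q h; simp [PySem.List.enumerate_nil] at h
  | cons x xs ih =>
    intro s q h
    rw [PySem.List.enumerate_cons] at h
    by_cases hx : x = c
    · rw [List.filter_cons_of_pos (by simp [hx])] at h
      rw [List.map_cons] at h
      rcases List.mem_cons.mp h with h1 | h2
      · simp at h1
        subst h1
        simp [hx]
      · have := ih (s + 1) q (by push_cast; exact h2)
        refine ⟨by omega, ?_⟩
        rw [show q - s = (q - (s + 1)) + 1 by omega]
        simpa using this.2
    · rw [List.filter_cons_of_neg (by simp [hx])] at h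
      have := ih (s + 1) q (by push_cast; exact h)
      refine ⟨by omega, ?_⟩
      rw [show q - s = (q - (s + 1)) + 1 by omega]
      simpa using this.2

lemma pvFindAll_mem (l : List Char) (c : Char) (q : Nat) (h : q ∈ pvFindAll l c) :
    l[q]? = some c := by
  have := pvFindAll_mem_aux c l 0 q (by simpa [pvFindAll] using h)
  simpa using this.2

lemma pvCount_step (pred word : List Char) (p : Nat) (hp : pred[p]? = some '?')
    (hw : '?' ∉ word) :
    (pred.take p ++ word ++ pred.drop (p + 1)).count '?' < pred.count '?' := by
  have hlt : p < pred.length := by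
    by_contra h
    rw [List.getElem?_eq_none (by omega)] at hp
    simp at hp
  have hval : pred[p] = '?' := by
    rw [List.getElem?_eq_getElem hlt] at hp; exact Option.some.inj hp
  conv_rhs => rw [← List.take_append_drop p pred, List.drop_eq_getElem_cons hlt]
  simp [List.count_append, hval, List.count_eq_zero.mpr hw]

-- the main loop of A: while placeholders nonempty, splice the next word in and re-scan
def pvALoop (prediction input : List Char) : List Char :=
  if hpl : pvFindAll prediction '?' = [] then prediction
  else
    let p := (pvFindAll prediction '?').head hpl
    match pvFindFrom input p with
    | none => prediction
    | some ws =>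
      pvALoop (prediction.take p
                ++ PySem.List.slice input (some (ws : Int)) (some ((pvWordEnd input ws : Nat) : Int))
                ++ prediction.drop (p + 1)) input
termination_by prediction.count '?'
decreasing_by
  apply pvCount_step
  · exact pvFindAll_mem _ _ _ (List.head_mem hpl)
  · rw [PySem.List.slice_natCast]
    intro hmem
    have := pvWord_all input ws '?' hmem
    exact absurd this (by decide)

def fill_placeholders_with_words (prediction : String) (input : String) : String :=
  if (pvFindAll prediction.toList '?').length = 0 then prediction
  else String.ofList (pvALoop prediction.toList input.toList)

-- ===== PORT B =====
-- single pass over the prediction; n = length of the output built so far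
def pvBGo (input : List Char) (n : Nat) : List Char → List Char
  | [] => []
  | c :: rest =>
    if c == '?' then
      match pvFindFrom input n with
      | none => c :: rest  -- 'out.append(prediction[idx:]); break'
      | some j =>
        let word := PySem.List.slice input (some (j : Int)) (some ((pvWordEnd input j : Nat) : Int))
        word ++ pvBGo input (n + word.length) rest
    else c :: pvBGo input (n + 1) rest

def fill_placeholders_with_words_alt (prediction : String) (input : String) : String :=
  String.ofList (pvBGo input.toList 0 prediction.toList)

-- ===== PRECONDITION & SPEC =====
def Spec_fill_placeholders_with_words (prediction : String) (input : String) (out : String) : Prop := out = fill_placeholders_with_words_alt prediction input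
instance (prediction : String) (input : String) (out : String) : Decidable (Spec_fill_placeholders_with_words prediction input out) := by unfold Spec_fill_placeholders_with_words; infer_instance

-- ===== CLAIM (what is proved, stated in full; the proofs are below) =====
def Claim_equal_fill_placeholders_with_words : Prop := ∀ (prediction : String) (input : String), Dom_fill_placeholders_with_words prediction input → Spec_fill_placeholders_with_words prediction input (fill_placeholders_with_words prediction input)

-- ===== LEMMAS AND PROOFS =====

lemma pvFindAll_aux_nil (c : Char) :
    ∀ (l : List Char) (s : Nat), c ∉ l →
      ((PySem.List.enumerate l (s : Int)).filter (fun ic => ic.2 == c)).map (fun ic => ic.1.toNat) = [] := by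
  intro l
  induction l with
  | nil => intro s _; simp [PySem.List.enumerate_nil]
  | cons x xs ih =>
    intro s h
    rw [PySem.List.enumerate_cons]
    rw [List.filter_cons_of_neg (by simp; intro hx; exact h (hx ▸ List.mem_cons_self ..))]
    rw [show ((s:Int) + 1) = ((s + 1 : Nat) : Int) by push_cast; ring]
    exact ih (s + 1) (fun hm => h (List.mem_cons_of_mem _ hm))

lemma pvFindAll_aux_split (c : Char) :
    ∀ (pre rest : List Char) (s : Nat), c ∉ pre →
      ∃ t, ((PySem.List.enumerate (pre ++ c :: rest) (s : Int)).filter (fun ic => ic.2 == c)).map (fun ic => ic.1.toNat)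
            = (s + pre.length) :: t := by
  intro pre
  induction pre with
  | nil =>
    intro rest s _
    rw [List.nil_append, PySem.List.enumerate_cons]
    rw [List.filter_cons_of_pos (by simp)]
    exact ⟨List.map (fun ic => ic.1.toNat) (List.filter (fun ic => ic.2 == c) (PySem.List.enumerate rest ((s:Int) + 1))), by simp⟩
  | cons x xs ih =>
    intro rest s h
    rw [List.cons_append, PySem.List.enumerate_cons]
    rw [List.filter_cons_of_neg (by simp; intro hx; exact h (hx ▸ List.mem_cons_self ..))]
    rw [show ((s:Int) + 1) = ((s + 1 : Nat) : Int) by push_cast; ring]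
    obtain ⟨t, ht⟩ := ih rest (s + 1) (fun hm => h (List.mem_cons_of_mem _ hm))
    exact ⟨t, by rw [ht]; congr 1; simp; omega⟩

lemma pvFindAll_nil_of_not_mem (l : List Char) (h : '?' ∉ l) : pvFindAll l '?' = [] := by
  simpa [pvFindAll] using pvFindAll_aux_nil '?' l 0 h

lemma pvFindAll_split (pre rest : List Char) (h : '?' ∉ pre) :
    ∃ t, pvFindAll (pre ++ '?' :: rest) '?' = pre.length :: t := by
  obtain ⟨t, ht⟩ := pvFindAll_aux_split '?' pre rest 0 h
  exact ⟨t, by simpa [pvFindAll] using ht⟩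

lemma pvMain (input : List Char) :
    ∀ (pred pre : List Char), '?' ∉ pre →
      pvALoop (pre ++ pred) input = pre ++ pvBGo input pre.length pred := by
  intro pred
  induction pred with
  | nil =>
    intro pre h
    rw [pvBGo, List.append_nil, pvALoop]
    rw [dif_pos (pvFindAll_nil_of_not_mem _ (by simpa using h))]
  | cons c rest ih =>
    intro pre h
    by_cases hc : c = '?'
    · subst hc
      obtain ⟨t, ht⟩ := pvFindAll_split pre rest h
      rw [pvALoop]
      rw [dif_neg (by rw [ht]; simp)]
      have hhead : (pvFindAll (pre ++ '?' :: rest) '?').head (by rw [ht]; simp) = pre.length := by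
        simp [ht]
      rw [pvBGo]
      simp only [beq_self_eq_true, if_true]
      rcases hff : pvFindFrom input pre.length with _ | ws
      · simp only [hhead, hff]
      · simp only [hhead, hff]
        have hword : '?' ∉ PySem.List.slice input (some (ws : Int)) (some ((pvWordEnd input ws : Nat) : Int)) := by
          rw [PySem.List.slice_natCast]
          intro hmem
          have := pvWord_all input ws '?' hmem
          exact absurd this (by decide)
        set word := PySem.List.slice input (some (ws : Int)) (some ((pvWordEnd input ws : Nat) : Int)) with hw
        have htake : (pre ++ '?' :: rest).take pre.length = pre := List.take_left
        have hdrop : (pre ++ '?' :: rest).drop (pre.length + 1) = rest := by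
          rw [show pre.length + 1 = (pre ++ ['?']).length by simp]
          rw [show pre ++ '?' :: rest = (pre ++ ['?']) ++ rest by simp]
          exact List.drop_left
        rw [htake, hdrop]
        have := ih (pre ++ word) (by simp [h, hword])
        rw [show pre ++ word ++ rest = (pre ++ word) ++ rest by simp] at this ⊢
        rw [this]
        simp
    · rw [pvBGo]
      simp only [beq_iff_eq, hc, if_false]
      have := ih (pre ++ [c]) (by
        intro hm
        rcases List.mem_append.mp hm with hm | hm
        · exact h hm
        · simp at hm; exact hc hm.symm)
      rw [show pre ++ c :: rest = (pre ++ [c]) ++ rest by simp, this]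
      simp

-- ===== VERDICT (by name: the statement is the Claim_ definition above) =====
theorem fill_placeholders_with_words_spec : Claim_equal_fill_placeholders_with_words := by
  intro prediction input _
  unfold Spec_fill_placeholders_with_words
  unfold fill_placeholders_with_words fill_placeholders_with_words_alt
  have hmain := pvMain input.toList prediction.toList [] (by simp)
  simp only [List.nil_append, List.length_nil] at hmain
  split
  · rename_i hlen
    have hnil : pvFindAll prediction.toList '?' = [] := List.length_eq_zero_iff.mp hlen
    rw [← hmain, pvALoop, dif_pos hnil]
    exact String.ofList_toList.symm
  · rw [← hmain]
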